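-- pv_equiv track=rewrite | github.com/hendrikmeersseman/informatica5 | 09 - toets WWI2/01 - Dronken woorden.py | dronken_voeren
-- ===== SOURCE A (Python) =====
-- def dronken_voeren(woord):
--     nieuw = woord[0]
--     for i in range(1, len(woord)):
--         if i % 2 == 0:
--             nieuw += woord[i].upper()
--         elif nieuw[-1] in 'AEIOU':
--             nieuw += woord[i].upper()
--         else:
--             nieuw += woord[i].lower()
--
--     return nieuw
-- ===== SOURCE B (Python) =====
-- def dronken_voeren(woord):
--     # pair-at-a-time: after the untouched first char, consume (odd, even) pairs,
--     # carrying only a boolean "previous output char is an uppercase vowel";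
--     # no parity test and no read of the accumulated output.
--     chunks = [woord[0]]
--     vowel = woord[0] in 'AEIOU'
--     i = 1
--     n = len(woord)
--     while i + 1 < n:
--         e = woord[i + 1].upper()
--         chunks.append((woord[i].upper() if vowel else woord[i].lower()) + e)
--         vowel = e in 'AEIOU'
--         i += 2
--     if i < n:
--         chunks.append(woord[i].upper() if vowel else woord[i].lower())
--     return ''.join(chunks)
-- ===== Notes on version B (the rewrite author's own statement) =====
-- stated objective: alternative
-- what changed: B consumes the word two characters at a time (one odd/even pair per iteration) carrying only a boolean vowel flag and collecting two-char chunks joined at the end, instead of A's per-index loop that tests i % 2 and re-reads the last character of the growing output string.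
import Mathlib
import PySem

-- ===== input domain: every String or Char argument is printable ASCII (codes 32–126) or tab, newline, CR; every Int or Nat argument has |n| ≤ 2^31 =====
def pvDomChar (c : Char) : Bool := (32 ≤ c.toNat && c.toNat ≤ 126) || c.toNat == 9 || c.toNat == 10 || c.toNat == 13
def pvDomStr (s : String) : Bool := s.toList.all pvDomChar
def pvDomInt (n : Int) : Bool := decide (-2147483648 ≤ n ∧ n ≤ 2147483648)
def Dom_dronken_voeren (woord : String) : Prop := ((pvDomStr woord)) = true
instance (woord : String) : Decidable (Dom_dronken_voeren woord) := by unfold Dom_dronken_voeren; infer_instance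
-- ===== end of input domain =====

-- B walks the word pair-at-a-time with a carried boolean vowel flag (alternative
-- decomposition); same return value wherever A returns.

-- ===== PORT A =====
-- the uppercase vowels 'AEIOU' (a single char's membership in that string)
def pvVowels : List Char := ['A', 'E', 'I', 'O', 'U']

-- the body of A's loop: one iteration appending to `nieuw` (nieuw[-1] is pyGetD _ (-1))
def pvAStep (cs : List Char) (nieuw : List Char) (i : Int) : List Char :=
  if PySem.Int.mod i 2 == 0 then
    nieuw ++ [PySem.Chars.upperChar (PySem.List.pyGetD cs i ' ')]
  else if PySem.List.pyGetD nieuw (-1) ' ' ∈ pvVowels then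
    nieuw ++ [PySem.Chars.upperChar (PySem.List.pyGetD cs i ' ')]
  else
    nieuw ++ [PySem.Chars.lowerChar (PySem.List.pyGetD cs i ' ')]

def dronken_voeren (woord : String) : String :=
  let cs := woord.toList
  let nieuw := (PySem.List.pyRange 1 (PySem.Str.len woord) 1).foldl
    (pvAStep cs) [PySem.List.pyGetD cs 0 ' ']
  String.ofList nieuw

-- ===== PORT B =====
-- Source B's while loop: at odd position i, emit the pair (cased woord[i], woord[i+1].upper())
-- as one chunk and carry the flag 'woord[i+1].upper() in AEIOU'; a lone trailing odd char
-- becomes a one-char chunk.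
def pvBLoop (cs : List Char) (vowel : Bool) (i : Nat) : List (List Char) :=
  if _h : i + 1 < cs.length then
    let e := PySem.Chars.upperChar (PySem.List.pyGetD cs ((i : Int) + 1) ' ')
    ((if vowel then PySem.Chars.upperChar (PySem.List.pyGetD cs (i : Int) ' ')
      else PySem.Chars.lowerChar (PySem.List.pyGetD cs (i : Int) ' ')) :: [e])
      :: pvBLoop cs (e ∈ pvVowels) (i + 2)
  else if i < cs.length then
    [[if vowel then PySem.Chars.upperChar (PySem.List.pyGetD cs (i : Int) ' ')
      else PySem.Chars.lowerChar (PySem.List.pyGetD cs (i : Int) ' ')]]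
  else []
termination_by cs.length - i
decreasing_by omega

def dronken_voeren_alt (woord : String) : String :=
  let cs := woord.toList
  -- ''.join(chunks) on the chunk list headed by [woord[0]]
  String.ofList (([PySem.List.pyGetD cs 0 ' ']
    :: pvBLoop cs (PySem.List.pyGetD cs 0 ' ' ∈ pvVowels) 1).flatten)

-- ===== PRECONDITION & SPEC =====
-- Pre_ excludes only the empty string, on which A raises IndexError at woord[0].
def Pre_dronken_voeren (woord : String) : Prop := woord ≠ ""
instance (woord : String) : Decidable (Pre_dronken_voeren woord) := by unfold Pre_dronken_voeren; infer_instance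
def pvWitness_dronken_voeren : String := "hallo"

def Spec_dronken_voeren (woord : String) (out : String) : Prop := out = dronken_voeren_alt woord
instance (woord : String) (out : String) : Decidable (Spec_dronken_voeren woord out) := by unfold Spec_dronken_voeren; infer_instance

-- ===== CLAIM (what is proved, stated in full; the proofs are below) =====
def Claim_equal_dronken_voeren : Prop := ∀ (woord : String), Dom_dronken_voeren woord → Pre_dronken_voeren woord → Spec_dronken_voeren woord (dronken_voeren woord)

-- ===== LEMMAS AND PROOFS =====

-- proof-side middle form: the character A's loop appends at index i, computed from cs only
def pvVowelPrev (cs : List Char) (i : Int) : Bool :=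
  if i == 1 then PySem.List.pyGetD cs 0 ' ' ∈ pvVowels
  else PySem.Chars.upperChar (PySem.List.pyGetD cs (i - 1) ' ') ∈ pvVowels

def pvAltChar (cs : List Char) (i : Int) : Char :=
  if PySem.Int.mod i 2 == 0 || pvVowelPrev cs i then
    PySem.Chars.upperChar (PySem.List.pyGetD cs i ' ')
  else
    PySem.Chars.lowerChar (PySem.List.pyGetD cs i ' ')

theorem pvGetD_append_singleton_neg_one (l : List Char) (x d : Char) :
    PySem.List.pyGetD (l ++ [x]) (-1) d = x := by
  simp [PySem.List.pyGetD, PySem.List.pyGet?, PySem.List.pyIdx?]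

theorem pvStep (cs : List Char) (k : Nat) :
    pvAStep cs
        (PySem.List.pyGetD cs 0 ' ' ::
          (PySem.List.pyRange 1 (1 + (k : Int)) 1).map (pvAltChar cs)) (1 + (k : Int))
      = PySem.List.pyGetD cs 0 ' ' ::
        ((PySem.List.pyRange 1 (1 + (k : Int)) 1).map (pvAltChar cs)
          ++ [pvAltChar cs (1 + (k : Int))]) := by
  unfold pvAStep
  cases hB : (PySem.Int.mod (1 + (k : Int)) 2 == 0) with
  | true =>
    have halt : pvAltChar cs (1 + (k : Int))
        = PySem.Chars.upperChar (PySem.List.pyGetD cs (1 + (k : Int)) ' ') := by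
      unfold pvAltChar; rw [hB]; simp
    simp only [reduceIte, halt, List.cons_append]
  | false =>
    simp only [Bool.false_eq_true, reduceIte]
    rcases Nat.eq_zero_or_pos k with hk | hk
    · subst hk
      have hr : PySem.List.pyRange 1 (1 + ((0 : Nat) : Int)) 1 = [] := by
        rw [PySem.List.pyRange_one_eq_nil]; norm_num
      rw [hr]
      have hlast : PySem.List.pyGetD [PySem.List.pyGetD cs 0 ' '] (-1) ' '
          = PySem.List.pyGetD cs 0 ' ' :=
        pvGetD_append_singleton_neg_one [] _ ' '
      have halt : pvAltChar cs (1 + ((0 : Nat) : Int))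
          = if PySem.List.pyGetD cs 0 ' ' ∈ pvVowels then
              PySem.Chars.upperChar (PySem.List.pyGetD cs (1 + ((0:Nat):Int)) ' ')
            else PySem.Chars.lowerChar (PySem.List.pyGetD cs (1 + ((0:Nat):Int)) ' ') := by
        unfold pvAltChar pvVowelPrev; norm_num
      simp only [List.map_nil, hlast, halt]
      by_cases hv : PySem.List.pyGetD cs 0 ' ' ∈ pvVowels <;> simp [hv]
    · have hsplit2 : PySem.List.pyRange 1 (1 + (k : Int)) 1
          = PySem.List.pyRange 1 (k : Int) 1 ++ [(k : Int)] := by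
        have h : (1 : Int) + (k : Int) = (k : Int) + 1 := by ring
        rw [h, PySem.List.pyRange_one_succ_right (by exact_mod_cast hk)]
      have hkev : (PySem.Int.mod (k : Int) 2 == 0) = true := by
        have h2 : PySem.Int.mod (1 + (k : Int)) 2 = 1 := by
          rcases PySem.Int.mod_two_eq (1 + (k : Int)) with h | h
          · rw [h] at hB; simp at hB
          · exact h
        have h1 := PySem.Int.floordiv_mul_add_mod (1 + (k : Int)) 2
        simp only [beq_iff_eq]
        rw [PySem.Int.mod_eq_zero_iff_dvd]
        exact ⟨PySem.Int.floordiv (1 + (k : Int)) 2, by omega⟩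
      have haltk : pvAltChar cs (k : Int)
          = PySem.Chars.upperChar (PySem.List.pyGetD cs (k : Int) ' ') := by
        unfold pvAltChar; rw [hkev]; simp
      have hlast : PySem.List.pyGetD
          (PySem.List.pyGetD cs 0 ' ' ::
            (PySem.List.pyRange 1 (1 + (k : Int)) 1).map (pvAltChar cs)) (-1) ' '
          = PySem.Chars.upperChar (PySem.List.pyGetD cs (k : Int) ' ') := by
        rw [hsplit2, List.map_append, List.map_singleton, haltk, ← List.cons_append]
        exact pvGetD_append_singleton_neg_one _ _ ' '
      have hne1 : ((1 + (k : Int)) == 1) = false := by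
        simp; omega
      have halt : pvAltChar cs (1 + (k : Int))
          = if PySem.Chars.upperChar (PySem.List.pyGetD cs (k : Int) ' ') ∈ pvVowels then
              PySem.Chars.upperChar (PySem.List.pyGetD cs (1 + (k : Int)) ' ')
            else PySem.Chars.lowerChar (PySem.List.pyGetD cs (1 + (k : Int)) ' ') := by
        unfold pvAltChar pvVowelPrev
        rw [hB, hne1]
        simp only [Bool.false_eq_true, reduceIte, Bool.false_or]
        have : (1 : Int) + (k : Int) - 1 = (k : Int) := by ring
        rw [this]
        simp only [decide_eq_true_eq]
      rw [hlast, halt]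
      by_cases hv : PySem.Chars.upperChar (PySem.List.pyGetD cs (k : Int) ' ') ∈ pvVowels
      · rw [if_pos hv, if_pos hv, List.cons_append]
      · rw [if_neg hv, if_neg hv, List.cons_append]

-- A's loop builds exactly the middle form: after k iterations the accumulator is
-- cs[0] followed by pvAltChar at indices 1..k
theorem pvMain (cs : List Char) (k : Nat) :
    (PySem.List.pyRange 1 (1 + (k : Int)) 1).foldl (pvAStep cs)
        [PySem.List.pyGetD cs 0 ' ']
      = PySem.List.pyGetD cs 0 ' ' ::
        (PySem.List.pyRange 1 (1 + (k : Int)) 1).map (pvAltChar cs) := by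
  induction k with
  | zero => simp [PySem.List.pyRange_one_eq_nil]
  | succ k ih =>
    have hsplit : PySem.List.pyRange 1 (1 + ((k + 1 : Nat) : Int)) 1
        = PySem.List.pyRange 1 (1 + (k : Int)) 1 ++ [1 + (k : Int)] := by
      have h : (1 : Int) + ((k + 1 : Nat) : Int) = (1 + (k : Int)) + 1 := by push_cast; ring
      rw [h, PySem.List.pyRange_one_succ_right (by omega)]
    rw [hsplit, List.foldl_append, List.map_append, List.map_singleton, ih]
    simp only [List.foldl_cons, List.foldl_nil]
    exact pvStep cs k

-- B's incoming flag at odd position 2k+1, read off cs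
def pvFlag (cs : List Char) (k : Nat) : Bool :=
  if k = 0 then PySem.List.pyGetD cs 0 ' ' ∈ pvVowels
  else PySem.Chars.upperChar (PySem.List.pyGetD cs (2 * (k : Int)) ' ') ∈ pvVowels

theorem pvFlag_eq_vowelPrev (cs : List Char) (k : Nat) :
    pvFlag cs k = pvVowelPrev cs (2 * (k : Int) + 1) := by
  unfold pvFlag pvVowelPrev
  rcases Nat.eq_zero_or_pos k with hk | hk
  · subst hk; norm_num
  · have h1 : ((2 * (k : Int) + 1) == 1) = false := by simp; omega
    rw [if_neg (by omega : ¬ k = 0), h1]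
    have h2 : 2 * (k : Int) + 1 - 1 = 2 * (k : Int) := by ring
    rw [h2]
    simp

theorem pvAltChar_odd (cs : List Char) (k : Nat) :
    pvAltChar cs (2 * (k : Int) + 1)
      = if pvFlag cs k then
          PySem.Chars.upperChar (PySem.List.pyGetD cs (2 * (k : Int) + 1) ' ')
        else PySem.Chars.lowerChar (PySem.List.pyGetD cs (2 * (k : Int) + 1) ' ') := by
  unfold pvAltChar
  have hodd : (PySem.Int.mod (2 * (k : Int) + 1) 2 == 0) = false := by
    simp only [beq_eq_false_iff_ne, ne_eq, PySem.Int.mod_eq_zero_iff_dvd]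
    rintro ⟨c, hc⟩; omega
  rw [hodd, pvFlag_eq_vowelPrev]
  cases pvVowelPrev cs (2 * (k : Int) + 1) <;> simp

theorem pvAltChar_even (cs : List Char) (j : Nat) :
    pvAltChar cs (2 * (j : Int))
      = PySem.Chars.upperChar (PySem.List.pyGetD cs (2 * (j : Int)) ' ') := by
  unfold pvAltChar
  have hev : (PySem.Int.mod (2 * (j : Int)) 2 == 0) = true := by
    simp only [beq_iff_eq, PySem.Int.mod_eq_zero_iff_dvd]
    exact ⟨(j : Int), by ring⟩
  rw [hev]; simp

-- B's loop flattens to the middle form over indices 2k+1 .. len-1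
theorem pvLoopEq (cs : List Char) :
    ∀ (m k : Nat), cs.length ≤ 2 * k + 1 + m →
      (pvBLoop cs (pvFlag cs k) (2 * k + 1)).flatten
        = (PySem.List.pyRange (2 * (k : Int) + 1) (cs.length : Int) 1).map
            (pvAltChar cs) := by
  intro m
  induction m with
  | zero =>
    intro k hm
    rw [pvBLoop, dif_neg (by omega), if_neg (by omega),
      PySem.List.pyRange_one_eq_nil (by omega)]
    simp
  | succ m ih =>
    intro k hm
    rw [pvBLoop]
    by_cases h2 : 2 * k + 1 + 1 < cs.length
    · rw [dif_pos h2]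
      push_cast
      rw [PySem.List.pyRange_one_cons (by omega : 2 * (k : Int) + 1 < (cs.length : Int))]
      have hc1 : 2 * (k : Int) + 1 + 1 = 2 * ((k + 1 : Nat) : Int) := by push_cast; ring
      rw [hc1]
      rw [PySem.List.pyRange_one_cons
        (by push_cast; omega : 2 * ((k + 1 : Nat) : Int) < (cs.length : Int))]
      have hc2 : 2 * ((k + 1 : Nat) : Int) + 1 = 2 * ((k + 1 : Nat) : Int) + 1 := rfl
      simp only [List.map_cons, List.flatten_cons, List.cons_append, List.nil_append]
      have hflag : (decide (PySem.Chars.upperChar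
            (PySem.List.pyGetD cs (2 * ((k + 1 : Nat) : Int)) ' ') ∈ pvVowels))
          = pvFlag cs (k + 1) := by
        unfold pvFlag
        rw [if_neg (by omega : ¬ k + 1 = 0)]
      have hstep : 2 * k + 1 + 2 = 2 * (k + 1) + 1 := by ring
      rw [hflag, hstep, ih (k + 1) (by omega)]
      rw [pvAltChar_odd cs k, pvAltChar_even cs (k + 1)]
    · rw [dif_neg h2]
      by_cases h1 : 2 * k + 1 < cs.length
      · rw [if_pos h1]
        rw [PySem.List.pyRange_one_cons (by omega : 2 * (k : Int) + 1 < (cs.length : Int)),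
          PySem.List.pyRange_one_eq_nil (by omega)]
        simp only [List.map_cons, List.map_nil, List.flatten_cons, List.flatten_nil,
          List.append_nil]
        push_cast
        rw [pvAltChar_odd cs k]
      · rw [if_neg h1, PySem.List.pyRange_one_eq_nil (by omega)]
        simp

-- ===== VERDICT (by name: the statement is the Claim_ definition above) =====
theorem dronken_voeren_spec : Claim_equal_dronken_voeren := by
  intro woord _hdom hpre
  unfold Spec_dronken_voeren dronken_voeren dronken_voeren_alt
  have hne : woord.toList ≠ [] := by
    simp only [ne_eq, String.toList_eq_nil_iff]; exact hpre
  have hpos : 0 < woord.toList.length := List.length_pos_iff.mpr hne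
  have hk : (PySem.Str.len woord) = 1 + ((woord.toList.length - 1 : Nat) : Int) := by
    rw [PySem.Str.len_eq]; omega
  simp only [hk]
  rw [pvMain]
  have hlen : (1 : Int) + ((woord.toList.length - 1 : Nat) : Int)
      = (woord.toList.length : Int) := by omega
  rw [hlen]
  have hloop := pvLoopEq woord.toList woord.toList.length 0 (by omega)
  have hflag0 : pvFlag woord.toList 0
      = decide (PySem.List.pyGetD woord.toList 0 ' ' ∈ pvVowels) := by
    unfold pvFlag; simp
  rw [hflag0] at hloop
  norm_num at hloop
  simp only [List.flatten_cons, List.singleton_append, String.length_toList]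
  rw [hloop]
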